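-- pv_equiv track=rewrite | github.com/fleurvanbalen/Programmeren-1 | oefententamen_sudoku.py | deelsudoku_is_correct
-- ===== SOURCE A (Python) =====
-- def deelsudoku_is_correct(s, k_r, g_r, k_k, g_k):
--     waardes = []
--     for r in range(k_r, g_r + 1):
--         for k in range(k_k, g_k + 1):
--             if s[r][k] != 0:
--                 if s[r][k] in waardes:
--                     return False
--                 waardes.append(s[r][k])
--     return True
-- ===== SOURCE B (Python) =====
-- def deelsudoku_is_correct(s, k_r, g_r, k_k, g_k):
--     values = sorted(s[r][k]
--                     for r in range(k_r, g_r + 1)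
--                     for k in range(k_k, g_k + 1)
--                     if s[r][k] != 0)
--     return all(a != b for a, b in zip(values, values[1:]))
-- ===== Notes on version B (the rewrite author's own statement) =====
-- stated objective: alternative
-- what changed: B sorts the collected nonzero region values and decides duplicates by one scan of adjacent pairs of the sorted list, instead of A's incremental membership check against a growing accumulator with early return.
-- outside the precondition, e.g. on deelsudoku_is_correct([[1, 1]], 0, 1, 0, 1): A returns False, B raises IndexError
import Mathlib
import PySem

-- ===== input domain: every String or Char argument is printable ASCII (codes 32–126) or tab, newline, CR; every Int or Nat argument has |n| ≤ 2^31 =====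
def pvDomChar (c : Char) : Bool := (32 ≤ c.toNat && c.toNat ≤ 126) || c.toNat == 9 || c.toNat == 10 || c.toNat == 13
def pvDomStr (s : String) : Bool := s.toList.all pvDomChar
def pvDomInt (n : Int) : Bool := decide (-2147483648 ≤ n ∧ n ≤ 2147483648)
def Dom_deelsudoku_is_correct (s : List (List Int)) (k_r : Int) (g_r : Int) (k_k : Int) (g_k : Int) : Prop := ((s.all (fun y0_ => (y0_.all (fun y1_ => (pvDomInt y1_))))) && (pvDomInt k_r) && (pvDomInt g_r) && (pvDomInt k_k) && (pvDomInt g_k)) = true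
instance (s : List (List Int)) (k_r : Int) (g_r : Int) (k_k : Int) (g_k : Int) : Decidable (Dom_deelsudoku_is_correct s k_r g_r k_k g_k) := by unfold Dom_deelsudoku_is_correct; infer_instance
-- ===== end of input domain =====

-- B sorts the collected nonzero region values and decides duplicates by one scan of adjacent
-- pairs of the sorted list, instead of A's incremental membership check with early return.
-- (Same result wherever Python A returns; Pre_ excludes the indexing errors.)

-- s[r][k]; exact inside Pre_ (both indices in range there); the default 0 is never reached under Pre_
def pvCell (s : List (List Int)) (r : Int) (k : Int) : Int :=
  PySem.List.pyGetD (PySem.List.pyGetD s r []) k 0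

-- ===== PORT A =====
-- inner 'for k' loop; none = the 'return False' branch, some w = the updated waardes
def pvInnerA (s : List (List Int)) (r : Int) (cols : List Int) (w : List Int) : Option (List Int) :=
  match cols with
  | [] => some w
  | k :: rest =>
    if pvCell s r k != 0 then
      if pvCell s r k ∈ w then none
      else pvInnerA s r rest (w ++ [pvCell s r k])
    else pvInnerA s r rest w

-- outer 'for r' loop
def pvOuterA (s : List (List Int)) (cols : List Int) (rows : List Int) (w : List Int) : Bool :=
  match rows with
  | [] => true
  | r :: rest =>
    match pvInnerA s r cols w with
    | none => false
    | some w' => pvOuterA s cols rest w'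

def deelsudoku_is_correct (s : List (List Int)) (k_r : Int) (g_r : Int) (k_k : Int) (g_k : Int) : Bool :=
  pvOuterA s (PySem.List.pyRange k_k (g_k + 1) 1) (PySem.List.pyRange k_r (g_r + 1) 1) []

-- ===== PORT B =====
def deelsudoku_is_correct_alt (s : List (List Int)) (k_r : Int) (g_r : Int) (k_k : Int) (g_k : Int) : Bool :=
  let values := PySem.List.sorted
      ((PySem.List.pyRange k_r (g_r + 1) 1).flatMap (fun r =>
        ((PySem.List.pyRange k_k (g_k + 1) 1).map (fun k => pvCell s r k)).filter (fun v => v != 0)))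
      (fun x => x) false
  (values.zip (PySem.List.slice values (some 1) none)).all (fun p => p.1 != p.2)

-- ===== PRECONDITION & SPEC =====
-- Pre_ excludes inputs on which Python A raises IndexError, i.e. where both index ranges are
-- nonempty and some cell s[r][k] of the rectangle is out of range (Python semantics: an index i
-- into xs is valid iff -len(xs) <= i < len(xs)); it also excludes inputs where A's early
-- 'return False' fires before it reaches an out-of-range cell (A returns False there, but B,
-- which reads the whole rectangle first, raises — see the cite in the claim).
def Pre_deelsudoku_is_correct (s : List (List Int)) (k_r : Int) (g_r : Int) (k_k : Int) (g_k : Int) : Prop :=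
  g_r < k_r ∨ g_k < k_k ∨
  (-(s.length : Int) ≤ k_r ∧ g_r < (s.length : Int) ∧
    ((PySem.List.pyRange k_r (g_r + 1) 1).all (fun r =>
      decide (-(((PySem.List.pyGetD s r []).length : Int)) ≤ k_k) &&
      decide (g_k < (((PySem.List.pyGetD s r []).length : Int)))) = true))
instance (s : List (List Int)) (k_r : Int) (g_r : Int) (k_k : Int) (g_k : Int) : Decidable (Pre_deelsudoku_is_correct s k_r g_r k_k g_k) := by unfold Pre_deelsudoku_is_correct; infer_instance

def pvWitness_deelsudoku_is_correct : List (List Int) × Int × Int × Int × Int := ([[1, 2], [3, 4]], 0, 1, 0, 1)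

def Spec_deelsudoku_is_correct (s : List (List Int)) (k_r : Int) (g_r : Int) (k_k : Int) (g_k : Int) (out : Bool) : Prop := out = deelsudoku_is_correct_alt s k_r g_r k_k g_k
instance (s : List (List Int)) (k_r : Int) (g_r : Int) (k_k : Int) (g_k : Int) (out : Bool) : Decidable (Spec_deelsudoku_is_correct s k_r g_r k_k g_k out) := by unfold Spec_deelsudoku_is_correct; infer_instance

-- ===== CLAIM (what is proved, stated in full; the proofs are below) =====
def Claim_equal_deelsudoku_is_correct : Prop := ∀ (s : List (List Int)) (k_r : Int) (g_r : Int) (k_k : Int) (g_k : Int), Dom_deelsudoku_is_correct s k_r g_r k_k g_k → Pre_deelsudoku_is_correct s k_r g_r k_k g_k → Spec_deelsudoku_is_correct s k_r g_r k_k g_k (deelsudoku_is_correct s k_r g_r k_k g_k)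

-- ===== LEMMAS AND PROOFS =====

-- the nonzero values of one row of the rectangle (the shape B's comprehension produces per row)
def pvRowVals (s : List (List Int)) (cols : List Int) (r : Int) : List Int :=
  (cols.map (fun k => pvCell s r k)).filter (fun v => v != 0)

lemma pvInnerA_eq (s : List (List Int)) (r : Int) :
    ∀ (cols : List Int) (w : List Int), w.Nodup →
      pvInnerA s r cols w =
        if (w ++ pvRowVals s cols r).Nodup then some (w ++ pvRowVals s cols r) else none := by
  intro cols
  induction cols with
  | nil => intro w hw; simp [pvInnerA, pvRowVals, hw]
  | cons k rest ih =>
    intro w hw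
    by_cases h0 : (pvCell s r k != 0) = true
    · have hrv : pvRowVals s (k :: rest) r = pvCell s r k :: pvRowVals s rest r := by
        simp [pvRowVals, h0]
      by_cases hvw : pvCell s r k ∈ w
      · have hnot : ¬ (w ++ pvRowVals s (k :: rest) r).Nodup := by
          intro hn
          rcases List.nodup_append.mp hn with ⟨-, -, hd⟩
          exact hd _ hvw _ (hrv ▸ List.mem_cons_self) rfl
        simp [pvInnerA, h0, hvw, hnot]
      · have hw' : (w ++ [pvCell s r k]).Nodup := by
          rw [List.nodup_append]
          refine ⟨hw, List.nodup_singleton _, ?_⟩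
          intro a ha b hb
          rw [List.mem_singleton] at hb
          subst hb
          exact fun hab => hvw (hab ▸ ha)
        rw [hrv]
        simp only [pvInnerA, h0, if_true, hvw, if_false, ih (w ++ [pvCell s r k]) hw',
          List.append_assoc, List.singleton_append]
    · have hrv : pvRowVals s (k :: rest) r = pvRowVals s rest r := by
        simp only [pvRowVals, List.map_cons, List.filter_cons]
        rw [if_neg (by simpa using h0)]
      rw [hrv]
      simp only [pvInnerA, h0]
      simp only [Bool.not_eq_true] at h0
      simp only [Bool.false_eq_true, if_false]
      exact ih w hw

lemma pvOuterA_eq (s : List (List Int)) (cols : List Int) :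
    ∀ (rows : List Int) (w : List Int), w.Nodup →
      pvOuterA s cols rows w = decide (w ++ rows.flatMap (fun r => pvRowVals s cols r)).Nodup := by
  intro rows
  induction rows with
  | nil => intro w hw; simp [pvOuterA, hw]
  | cons r rest ih =>
    intro w hw
    simp only [pvOuterA]
    rw [pvInnerA_eq s r cols w hw]
    by_cases h : (w ++ pvRowVals s cols r).Nodup
    · rw [if_pos h]
      simp only []
      rw [ih _ h]
      simp [List.append_assoc]
    · rw [if_neg h]
      have hbig : ¬ (w ++ (r :: rest).flatMap (fun r => pvRowVals s cols r)).Nodup := by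
        intro hc
        simp only [List.flatMap_cons, ← List.append_assoc] at hc
        exact h (List.Nodup.sublist (List.sublist_append_left _ _) hc)
      simp only [List.flatMap_cons] at hbig
      simp [hbig]

-- zip-with-tail scan computes IsChain (· ≠ ·)
lemma pvZipAll_eq_chain' : ∀ (l : List Int),
    ((l.zip l.tail).all (fun p => p.1 != p.2)) = true ↔ l.IsChain (· ≠ ·) := by
  intro l
  induction l with
  | nil => simp
  | cons a t ih =>
    cases t with
    | nil => simp [List.isChain_singleton a]
    | cons b t' =>
      rw [List.isChain_cons_cons]
      simp only [List.tail_cons, List.zip_cons_cons, List.all_cons, Bool.and_eq_true,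
        bne_iff_ne] at ih ⊢
      exact and_congr Iff.rfl ih

-- on a ≤-sorted list, adjacent-distinct gives strict pairwise increase
lemma pvPairwiseLt : ∀ (l : List Int),
    l.Pairwise (· ≤ ·) → l.IsChain (· ≠ ·) → l.Pairwise (· < ·) := by
  intro l
  induction l with
  | nil => intro _ _; exact List.Pairwise.nil
  | cons a t ih =>
    intro hp hc
    rcases List.pairwise_cons.mp hp with ⟨hle, hp'⟩
    refine List.pairwise_cons.mpr ⟨?_, ih hp' hc.tail⟩
    cases t with
    | nil => intro b hb; cases hb
    | cons c t' =>
      have hac : a < c := lt_of_le_of_ne (hle c List.mem_cons_self) (List.isChain_cons_cons.mp hc).1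
      intro b hb
      rcases List.mem_cons.mp hb with rfl | hb'
      · exact hac
      · exact lt_of_lt_of_le hac ((List.pairwise_cons.mp hp').1 b hb')

lemma pvSortedScan_eq_nodup (values : List Int) :
    (let vs := PySem.List.sorted values (fun x => x) false
     (vs.zip (PySem.List.slice vs (some 1) none)).all (fun p => p.1 != p.2)) =
      decide values.Nodup := by
  have hperm : (PySem.List.sorted values (fun x => x) false).Perm values :=
    PySem.List.sorted_perm values (fun x => x) false
  have hpw : (PySem.List.sorted values (fun x => x) false).Pairwise (· ≤ ·) := by
    have := PySem.List.sorted_pairwise (key := fun x : Int => x) (xs := values)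
    simpa using this
  set vs := PySem.List.sorted values (fun x => x) false with hvs
  simp only [PySem.List.slice_from_one]
  by_cases h : values.Nodup
  · have hnd : vs.Nodup := (List.Perm.nodup_iff hperm).mpr h
    have hch : vs.IsChain (· ≠ ·) := List.Pairwise.isChain hnd
    simp [(pvZipAll_eq_chain' vs).mpr hch, h]
  · have : ¬ ((vs.zip vs.tail).all (fun p => p.1 != p.2)) = true := by
      intro hall
      have hlt := pvPairwiseLt vs hpw ((pvZipAll_eq_chain' vs).mp hall)
      exact h ((List.Perm.nodup_iff hperm).mp (hlt.imp ne_of_lt))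
    simp only [h, decide_false]
    exact Bool.eq_false_iff.mpr (fun hc => this hc)

-- ===== VERDICT (by name: the statement is the Claim_ definition above) =====
theorem deelsudoku_is_correct_spec : Claim_equal_deelsudoku_is_correct := by
  intro s k_r g_r k_k g_k _ _
  unfold Spec_deelsudoku_is_correct deelsudoku_is_correct deelsudoku_is_correct_alt
  rw [pvOuterA_eq s _ _ [] (by simp)]
  rw [pvSortedScan_eq_nodup]
  simp [pvRowVals]
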